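-- pv_equiv track=rewrite | github.com/NoisimRo/APP-AI | backend/app/services/rag.py | _deduplicate_cpv_codes
-- ===== SOURCE A (Python) =====
-- def _deduplicate_cpv_codes(rows: list[tuple]) -> list[str]:
--     """Deduplicate CPV codes: if we have a parent code, skip its children.
--
--     Args:
--         rows: List of (cod_cpv, nivel) tuples.
--
--     Returns:
--         Deduplicated list of CPV codes.
--     """
--     cpv_codes = []
--     seen_prefixes: set[str] = set()
--     for row in rows:
--         cod = row[0]
--         prefix = cod.split("-")[0] if cod else cod
--         is_child = any(prefix.startswith(sp) for sp in seen_prefixes)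
--         if not is_child:
--             cpv_codes.append(cod)
--             seen_prefixes.add(prefix.rstrip("0") if prefix else "")
--     return cpv_codes
-- ===== SOURCE B (Python) =====
-- def _deduplicate_cpv_codes(rows: list[tuple]) -> list[str]:
--     """Deduplicate CPV codes: if we have a parent code, skip its children.
--
--     Checks each initial segment of the row's prefix against a hash set
--     instead of scanning every stored prefix.
--     """
--     kept = []
--     seen = set()
--     for row in rows:
--         cod = row[0]
--         prefix = cod.split("-")[0] if cod else cod
--         if all(prefix[:k] not in seen for k in range(len(prefix) + 1)):
--             kept.append(cod)
--             seen.add(prefix.rstrip("0") if prefix else "")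
--     return kept
-- ===== Notes on version B (the rewrite author's own statement) =====
-- stated objective: alternative
-- what changed: The per-row scan 'any(prefix.startswith(sp) for sp in seen)' over all stored prefixes is replaced by hash-set membership tests of each initial segment of the row's own prefix, so the result no longer iterates the seen set at all.
import Mathlib
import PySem

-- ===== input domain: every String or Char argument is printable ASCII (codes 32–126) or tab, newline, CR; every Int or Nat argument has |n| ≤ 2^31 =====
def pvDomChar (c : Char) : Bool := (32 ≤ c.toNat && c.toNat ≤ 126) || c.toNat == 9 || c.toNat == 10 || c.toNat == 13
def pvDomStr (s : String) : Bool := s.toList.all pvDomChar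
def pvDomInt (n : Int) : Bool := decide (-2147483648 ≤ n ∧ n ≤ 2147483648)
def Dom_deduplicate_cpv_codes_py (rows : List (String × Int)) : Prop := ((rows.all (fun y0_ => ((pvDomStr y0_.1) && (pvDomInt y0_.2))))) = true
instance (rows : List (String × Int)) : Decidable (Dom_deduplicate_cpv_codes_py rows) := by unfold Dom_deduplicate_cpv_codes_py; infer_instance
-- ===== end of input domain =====

-- ===== PORT A =====
-- B replaces the per-row scan over all stored prefixes by hash-set membership
-- tests of the prefix's own initial segments (alternative algorithm, same result).

-- exact hand port of Python's  s.rstrip("0")  (drop trailing '0' characters; PySem has no rstrip-with-chars)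
def pyRstrip0 (s : String) : String :=
  String.ofList ((s.toList.reverse.dropWhile (fun c => c == '0')).reverse)

def deduplicate_cpv_codes_py (rows : List (String × Int)) : List String :=
  (rows.foldl
    (fun (st : List String × PySem.Set String) row =>
      let cod := row.1
      let pfx := if cod ≠ "" then PySem.List.pyGetD ((PySem.Str.split? cod "-").getD []) 0 "" else cod
      let is_child := st.2.any (fun sp => PySem.Str.startswith pfx sp)
      if !is_child then
        (st.1 ++ [cod], st.2.add (if pfx ≠ "" then pyRstrip0 pfx else ""))
      else st)
    ([], PySem.Set.empty)).1

-- ===== PORT B =====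
def dedupAltGo (seen : PySem.Set String) (rows : List (String × Int)) : List String :=
  match rows with
  | [] => []
  | row :: rest =>
    let cod := row.1
    let pfx := if cod ≠ "" then PySem.List.pyGetD ((PySem.Str.split? cod "-").getD []) 0 "" else cod
    if (PySem.List.pyRange 0 (PySem.Str.len pfx + 1) 1).all
        (fun k => !(seen.contains (PySem.Str.slice pfx none (some k)))) then
      cod :: dedupAltGo (seen.add (if pfx ≠ "" then pyRstrip0 pfx else "")) rest
    else
      dedupAltGo seen rest

def deduplicate_cpv_codes_py_alt (rows : List (String × Int)) : List String :=
  dedupAltGo PySem.Set.empty rows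

-- ===== PRECONDITION & SPEC =====
def Spec_deduplicate_cpv_codes_py (rows : List (String × Int)) (out : List String) : Prop := out = deduplicate_cpv_codes_py_alt rows
instance (rows : List (String × Int)) (out : List String) : Decidable (Spec_deduplicate_cpv_codes_py rows out) := by unfold Spec_deduplicate_cpv_codes_py; infer_instance

-- ===== CLAIM (what is proved, stated in full; the proofs are below) =====
def Claim_equal_deduplicate_cpv_codes_py : Prop := ∀ (rows : List (String × Int)), Dom_deduplicate_cpv_codes_py rows → Spec_deduplicate_cpv_codes_py rows (deduplicate_cpv_codes_py rows)

-- ===== LEMMAS AND PROOFS =====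

-- A's membership test 'some stored prefix starts our prefix' coincides with
-- B's test 'some initial segment of our prefix is stored' (for ANY set of stored strings).
lemma child_check_eq (seen : PySem.Set String) (p : String) :
    seen.any (fun sp => PySem.Str.startswith p sp)
      = !((PySem.List.pyRange 0 (PySem.Str.len p + 1) 1).all
          (fun k => !(seen.contains (PySem.Str.slice p none (some k))))) := by
  rw [List.all_eq_not_any_not]
  simp only [Bool.not_not]
  rw [Bool.eq_iff_iff, List.any_eq_true, List.any_eq_true]
  constructor
  · rintro ⟨sp, hmem, hsw⟩
    rw [PySem.Str.startswith_eq, PySem.Chars.startswith_iff] at hsw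
    refine ⟨(sp.toList.length : Int), ?_, ?_⟩
    · rw [PySem.List.mem_pyRange_one, PySem.Str.len_eq]
      have := hsw.length_le
      omega
    · have hsl : PySem.Str.slice p none (some (sp.toList.length : Int)) = sp := by
        apply String.toList_inj.mp
        rw [PySem.Str.toList_slice, PySem.Chars.slice_eq_listSlice,
          PySem.List.slice_to _ (Int.natCast_nonneg _)]
        simp only [Int.toNat_natCast]
        exact (List.prefix_iff_eq_take.mp hsw).symm
      rw [hsl]
      exact (PySem.Set.contains_iff seen sp).mpr hmem
  · rintro ⟨k, hk, hc⟩
    rw [PySem.List.mem_pyRange_one] at hk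
    refine ⟨PySem.Str.slice p none (some k), (PySem.Set.contains_iff _ _).mp hc, ?_⟩
    rw [PySem.Str.startswith_eq, PySem.Chars.startswith_iff,
      PySem.Str.toList_slice, PySem.Chars.slice_eq_listSlice,
      PySem.List.slice_to _ hk.1]
    exact List.take_prefix _ _

-- the two loops produce the same output from any common state
lemma loops_eq (rows : List (String × Int)) :
    ∀ (acc : List String) (seen : PySem.Set String),
      (rows.foldl
        (fun (st : List String × PySem.Set String) row =>
          let cod := row.1
          let pfx := if cod ≠ "" then PySem.List.pyGetD ((PySem.Str.split? cod "-").getD []) 0 "" else cod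
          let is_child := st.2.any (fun sp => PySem.Str.startswith pfx sp)
          if !is_child then
            (st.1 ++ [cod], st.2.add (if pfx ≠ "" then pyRstrip0 pfx else ""))
          else st)
        (acc, seen)).1 = acc ++ dedupAltGo seen rows := by
  induction rows with
  | nil => intro acc seen; simp [dedupAltGo]
  | cons row rest ih =>
    intro acc seen
    rw [List.foldl_cons]
    simp only
    rw [child_check_eq seen]
    by_cases h : (PySem.List.pyRange 0
        (PySem.Str.len (if row.1 ≠ "" then PySem.List.pyGetD ((PySem.Str.split? row.1 "-").getD []) 0 "" else row.1) + 1) 1).all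
        (fun k => !(seen.contains (PySem.Str.slice
          (if row.1 ≠ "" then PySem.List.pyGetD ((PySem.Str.split? row.1 "-").getD []) 0 "" else row.1) none (some k)))) = true
    · rw [dedupAltGo]
      simp only [h, Bool.not_true, if_true]
      rw [ih]
      simp
    · rw [dedupAltGo]
      simp only [Bool.not_eq_true] at h
      simp only [h, Bool.not_false, Bool.not_true]
      exact ih acc seen

-- ===== VERDICT (by name: the statement is the Claim_ definition above) =====
theorem deduplicate_cpv_codes_py_spec : Claim_equal_deduplicate_cpv_codes_py := by
  intro rows _
  unfold Spec_deduplicate_cpv_codes_py deduplicate_cpv_codes_py deduplicate_cpv_codes_py_alt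
  exact loops_eq rows [] PySem.Set.empty
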